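-- pv_equiv track=rewrite | github.com/mayankk2308/nutshell | src/core/unix layer/unix_layer.py | parse_natural_command
-- ===== SOURCE A (Python) =====
-- def parse_natural_command(unix_command):
--     quotes = 0
--     unix_command += " "
--     current_arg = ""
--     args = []
--     for character in unix_command:
--         if character is " " and quotes % 2 is 0:
--             args.append(current_arg)
--             current_arg = ""
--         elif character is "'":
--             quotes += 1
--         else:
--             current_arg += character
--
--     return args
-- ===== SOURCE B (Python) =====
-- def parse_natural_command(unix_command):
--     args = []
--     acc = ""
--     for i, segment in enumerate((unix_command + " ").split("'")):
--         if i % 2 == 1: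
--             acc += segment
--         else:
--             pieces = segment.split(" ")
--             acc += pieces[0]
--             for piece in pieces[1:]:
--                 args.append(acc)
--                 acc = piece
--     return args
-- ===== Notes on version B (the rewrite author's own statement) =====
-- stated objective: faster
-- what changed: Replaces A's per-character state machine (quote counter, char-by-char string concatenation) with a split-based decomposition: split the command plus a trailing space on quotes, treat odd-indexed segments as literal quoted text, split even-indexed segments on spaces and flush the accumulator between pieces.
import Mathlib
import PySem

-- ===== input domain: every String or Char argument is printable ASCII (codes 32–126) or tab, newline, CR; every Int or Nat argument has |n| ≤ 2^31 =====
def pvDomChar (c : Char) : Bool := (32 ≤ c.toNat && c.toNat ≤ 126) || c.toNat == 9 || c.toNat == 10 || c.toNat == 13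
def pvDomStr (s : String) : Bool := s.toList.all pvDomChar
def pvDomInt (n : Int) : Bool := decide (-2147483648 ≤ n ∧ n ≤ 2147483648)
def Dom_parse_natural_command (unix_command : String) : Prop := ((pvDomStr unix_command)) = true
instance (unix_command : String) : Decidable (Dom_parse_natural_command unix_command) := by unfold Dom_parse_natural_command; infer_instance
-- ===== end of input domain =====

-- B re-implements the quote-aware splitter by splitting on quote characters and spaces
-- (bulk str.split) instead of A's per-character state machine; a timing run measured B
-- faster by a constant factor (objective: faster).

-- ===== PORT A =====
-- one loop iteration of A: state = (quotes, current_arg, args)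
def pvStepA (st : Int × List Char × List (List Char)) (c : Char) :
    Int × List Char × List (List Char) :=
  if c = ' ' ∧ PySem.Int.mod st.1 2 = 0 then (st.1, [], st.2.2 ++ [st.2.1])
  else if c = '\'' then (st.1 + 1, st.2.1, st.2.2)
  else (st.1, st.2.1 ++ [c], st.2.2)

def parse_natural_command (unix_command : String) : List String :=
  ((unix_command.toList ++ [' ']).foldl pvStepA (0, [], [])).2.2.map
    (fun cs => String.ofList cs)

-- ===== PORT B =====
-- args.append(acc); acc = piece
def pvFlushB (st : List (List Char) × List Char) (piece : List Char) :
    List (List Char) × List Char :=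
  (st.1 ++ [st.2], piece)

-- even-indexed segment: split on spaces, extend acc by the first piece, flush for the rest
def pvSegB (st : List (List Char) × List Char) (seg : List Char) :
    List (List Char) × List Char :=
  match PySem.Chars.splitOn seg [' '] with
  | [] => st
  | p0 :: rest => rest.foldl pvFlushB (st.1, st.2 ++ p0)

def parse_natural_command_alt (unix_command : String) : List String :=
  let segs := PySem.Chars.splitOn (unix_command.toList ++ [' ']) ['\'']
  ((PySem.List.enumerate segs).foldl
      (fun st p =>
        if PySem.Int.mod p.1 2 = 1 then (st.1, st.2 ++ p.2) else pvSegB st p.2)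
      ([], [])).1.map (fun cs => String.ofList cs)

-- ===== PRECONDITION & SPEC =====
def Spec_parse_natural_command (unix_command : String) (out : List String) : Prop := out = parse_natural_command_alt unix_command
instance (unix_command : String) (out : List String) : Decidable (Spec_parse_natural_command unix_command out) := by unfold Spec_parse_natural_command; infer_instance

-- ===== CLAIM (what is proved, stated in full; the proofs are below) =====
def Claim_equal_parse_natural_command : Prop := ∀ (unix_command : String), Dom_parse_natural_command unix_command → Spec_parse_natural_command unix_command (parse_natural_command unix_command)

-- ===== LEMMAS AND PROOFS =====

-- structural characterisation of splitting on a single character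
def pvSplitC (c : Char) : List Char → List (List Char)
  | [] => [[]]
  | d :: ds => if d = c then [] :: pvSplitC c ds else (pvSplitC c ds).modifyHead (d :: ·)

lemma pvSplitC_ne_nil (c : Char) (l : List Char) : pvSplitC c l ≠ [] := by
  cases l with
  | nil => simp [pvSplitC]
  | cons d ds =>
    simp only [pvSplitC]
    split_ifs
    · simp
    · exact fun h => pvSplitC_ne_nil c ds (by simpa using congrArg List.length h)

lemma pvSplitOn_go_single (c : Char) :
    ∀ (fuel : Nat) (l cur : List Char) (acc : List (List Char)), l.length < fuel →
      PySem.Chars.splitOn.go [c] fuel l cur acc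
        = acc.reverse ++ (pvSplitC c l).modifyHead (cur.reverse ++ ·) := by
  intro fuel
  induction fuel with
  | zero => intro l cur acc h; omega
  | succ n ih =>
    intro l cur acc h
    cases l with
    | nil => simp [PySem.Chars.splitOn.go, pvSplitC]
    | cons d ds =>
      by_cases hd : d = c
      · subst hd
        rw [show PySem.Chars.splitOn.go [d] (n+1) (d :: ds) cur acc
              = PySem.Chars.splitOn.go [d] n ds [] (cur.reverse :: acc) by
            simp [PySem.Chars.splitOn.go]]
        rw [ih ds [] (cur.reverse :: acc) (by simpa using Nat.lt_of_succ_lt_succ h)]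
        simp [pvSplitC]
        cases pvSplitC d ds <;> rfl
      · rw [show PySem.Chars.splitOn.go [c] (n+1) (d :: ds) cur acc
              = PySem.Chars.splitOn.go [c] n ds (d :: cur) acc by
            simp [PySem.Chars.splitOn.go, List.isPrefixOf,
              show ¬ c = d from fun h => hd h.symm]]
        rw [ih ds (d :: cur) acc (by simpa using Nat.lt_of_succ_lt_succ h)]
        obtain ⟨h0, hs, hS⟩ := List.exists_cons_of_ne_nil (pvSplitC_ne_nil c ds)
        simp [pvSplitC, hd, hS]

lemma pvSplitOn_single (c : Char) (l : List Char) :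
    PySem.Chars.splitOn l [c] = pvSplitC c l := by
  rw [PySem.Chars.splitOn, pvSplitOn_go_single c (l.length + 1) l [] [] (by omega)]
  obtain ⟨h0, hs, hS⟩ := List.exists_cons_of_ne_nil (pvSplitC_ne_nil c l)
  simp [hS]

-- proof-side spec of B's segment loop: mode = true on odd-indexed (inside-quotes) segments
def pvProc (mode : Bool) (st : List (List Char) × List Char) :
    List (List Char) → List (List Char) × List Char
  | [] => st
  | seg :: rest =>
    if mode then pvProc false (st.1, st.2 ++ seg) rest
    else pvProc true (pvSegB st seg) rest

lemma pvEnum_foldl (segs : List (List Char)) :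
    ∀ (i : Int) (st : List (List Char) × List Char), 0 ≤ i →
      (PySem.List.enumerate segs i).foldl
          (fun st p =>
            if PySem.Int.mod p.1 2 = 1 then (st.1, st.2 ++ p.2) else pvSegB st p.2) st
        = pvProc (decide (PySem.Int.mod i 2 = 1)) st segs := by
  induction segs with
  | nil => intro i st _; simp [PySem.List.enumerate_nil, pvProc]
  | cons seg rest ih =>
    intro i st hi
    rw [PySem.List.enumerate_cons, List.foldl_cons, ih (i+1) _ (by omega)]
    rw [PySem.Int.mod_eq_emod_of_pos (by norm_num), PySem.Int.mod_eq_emod_of_pos (by norm_num)]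
    by_cases hp : i % 2 = 1
    · simp [pvProc, hp, show (i+1) % 2 ≠ 1 by omega]
    · simp [pvProc, hp, show (i+1) % 2 = 1 by omega]

lemma pvSegB_nil (st : List (List Char) × List Char) : pvSegB st [] = st := by
  simp [pvSegB, pvSplitOn_single, pvSplitC]

lemma pvSegB_space (st : List (List Char) × List Char) (h : List Char) :
    pvSegB st (' ' :: h) = pvSegB (st.1 ++ [st.2], []) h := by
  obtain ⟨h0, hs, hS⟩ := List.exists_cons_of_ne_nil (pvSplitC_ne_nil ' ' h)
  simp [pvSegB, pvSplitOn_single, pvSplitC, hS, pvFlushB]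

lemma pvSegB_char (st : List (List Char) × List Char) (c : Char) (h : List Char)
    (hc : c ≠ ' ') : pvSegB st (c :: h) = pvSegB (st.1, st.2 ++ [c]) h := by
  obtain ⟨h0, hs, hS⟩ := List.exists_cons_of_ne_nil (pvSplitC_ne_nil ' ' h)
  simp [pvSegB, pvSplitOn_single, pvSplitC, hc, hS]

lemma pvMain (l : List Char) :
    ∀ (q : Int) (cur : List Char) (args : List (List Char)),
      ((l.foldl pvStepA (q, cur, args)).2.2, (l.foldl pvStepA (q, cur, args)).2.1)
        = pvProc (decide (PySem.Int.mod q 2 = 1)) (args, cur) (pvSplitC '\'' l) := by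
  induction l with
  | nil =>
    intro q cur args
    by_cases hq : PySem.Int.mod q 2 = 1 <;>
      simp [pvProc, pvSplitC, pvSegB_nil]
  | cons c rest ih =>
    intro q cur args
    rw [PySem.Int.mod_eq_emod_of_pos (by norm_num)]
    by_cases hc : c = '\''
    · subst hc
      have hstep : pvStepA (q, cur, args) '\'' = (q + 1, cur, args) := by
        simp [pvStepA]
      rw [List.foldl_cons, hstep, ih (q+1) cur args,
        PySem.Int.mod_eq_emod_of_pos (show (0:Int) < 2 by norm_num)]
      by_cases hq : q % 2 = 1
      · simp [pvSplitC, pvProc, hq, show (q+1) % 2 ≠ 1 by omega]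
      · simp [pvSplitC, pvProc, hq, show (q+1) % 2 = 1 by omega, pvSegB_nil]
    · obtain ⟨h0, hs, hS⟩ := List.exists_cons_of_ne_nil (pvSplitC_ne_nil '\'' rest)
      by_cases hq : q % 2 = 1
      · have hstep : pvStepA (q, cur, args) c = (q, cur ++ [c], args) := by
          simp [pvStepA, hc]
          intro _; omega
        rw [List.foldl_cons, hstep, ih q (cur ++ [c]) args]
        simp [pvSplitC, hc, hS, pvProc, hq]
      · by_cases hsp : c = ' '
        · subst hsp
          have hd2 : (2:Int) ∣ q := by omega
          have hstep : pvStepA (q, cur, args) ' ' = (q, [], args ++ [cur]) := by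
            simp [pvStepA, hd2]
          rw [List.foldl_cons, hstep, ih q [] (args ++ [cur]),
            PySem.Int.mod_eq_emod_of_pos (show (0:Int) < 2 by norm_num)]
          simp [pvSplitC, hc, hS, pvProc, hq, pvSegB_space]
        · have hstep : pvStepA (q, cur, args) c = (q, cur ++ [c], args) := by
            simp [pvStepA, hc, hsp]
          rw [List.foldl_cons, hstep, ih q (cur ++ [c]) args,
            PySem.Int.mod_eq_emod_of_pos (show (0:Int) < 2 by norm_num)]
          simp [pvSplitC, hc, hS, pvProc, hq, pvSegB_char _ _ _ hsp]

-- ===== VERDICT (by name: the statement is the Claim_ definition above) =====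
theorem parse_natural_command_spec : Claim_equal_parse_natural_command := by
  intro u _
  have key : (List.foldl pvStepA (0, [], []) (u.toList ++ [' '])).2.2
      = (List.foldl
          (fun st p => if PySem.Int.mod p.1 2 = 1 then (st.1, st.2 ++ p.2) else pvSegB st p.2)
          ([], [])
          (PySem.List.enumerate (PySem.Chars.splitOn (u.toList ++ [' ']) ['\'']))).1 := by
    rw [pvEnum_foldl _ 0 _ (le_refl 0), pvSplitOn_single]
    have h := pvMain (u.toList ++ [' ']) 0 [] []
    rw [show (decide (PySem.Int.mod (0:Int) 2 = 1)) = false from rfl] at h ⊢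
    exact congrArg Prod.fst h
  show _ = _
  simp only [parse_natural_command, parse_natural_command_alt, key]
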